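-- pv_equiv track=rewrite | github.com/Prais3/Artificial-Intelligence | AI_projects/Markov_Models.py | ngrams
-- ===== SOURCE A (Python) =====
-- def ngrams(n, tokens):
--     first, last = 0, n - 1
--     tokens += ["<END>"]
--     initial = tuple(["<START>"] * (n - 1) + tokens)
--     ng_list = []
--
--     # For loop to iterate through the tokens and append to the list
--     for x in tokens:
--         ng_list.append((initial[first:last], x))
--         first += 1
--         last += 1
--     return ng_list
-- ===== SOURCE B (Python) =====
-- def _go(ctx, rest, k):
--     if not rest:
--         return []
--     x = rest[0]
--     new_ctx = (ctx + (x,))[1:] if k else ctx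
--     return [(ctx, x)] + _go(new_ctx, rest[1:], k)
--
-- def ngrams(n, tokens):
--     tokens += ["<END>"]          # same in-place mutation as the original
--     k = n - 1 if n > 1 else 0
--     return _go(("<START>",) * k, tokens, k)
-- ===== Notes on version B (the rewrite author's own statement) =====
-- stated objective: alternative
-- what changed: B is a recursive helper that peels one token per call and threads the (n-1)-token context as a tuple trimmed by one slice per step, building the result by list concatenation front-to-back, instead of A's loop over two integer cursors re-slicing a padded copy of the whole token list.
-- intended difference: For n <= 0 with n + len(tokens) > 0, A's negative slice end makes it return large leftover slices of the token list as contexts (e.g. the whole token list for n = 0), while B returns the empty context at every position, which is the intended value since an n-gram with n <= 1 has no context tokens. — e.g. on ngrams(0, ["a"]): A returns [(["a"], "a"), ([], "<END>")], B returns [([], "a"), ([], "<END>")]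
import Mathlib
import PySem

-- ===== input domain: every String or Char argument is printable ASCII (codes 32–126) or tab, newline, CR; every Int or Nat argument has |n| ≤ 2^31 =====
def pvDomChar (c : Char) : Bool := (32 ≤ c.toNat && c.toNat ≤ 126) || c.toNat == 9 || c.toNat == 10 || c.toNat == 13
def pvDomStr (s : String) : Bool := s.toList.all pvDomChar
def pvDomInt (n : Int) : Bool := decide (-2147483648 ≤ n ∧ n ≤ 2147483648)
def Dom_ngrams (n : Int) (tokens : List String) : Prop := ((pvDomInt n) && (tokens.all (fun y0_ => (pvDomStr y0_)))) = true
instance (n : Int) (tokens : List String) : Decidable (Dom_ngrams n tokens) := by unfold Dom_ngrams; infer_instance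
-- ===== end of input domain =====

-- B replaces A's "pad the whole token list and re-slice it by two moving cursors" by a recursive
-- helper that peels one token per call and trims the context tuple with one slice per step
-- (alternative decomposition, same cost); both mutate the caller's `tokens` list in Python
-- (`tokens += ["<END>"]`), the equivalence is about the return value.


-- ===== PORT A =====
-- literal transliteration of A: pad with n-1 "<START>", then slice initial[first:last] each step
def ngrams (n : Int) (tokens : List String) : List (List String × String) :=
  let tokens' := tokens ++ ["<END>"]
  let initial := List.replicate (n - 1).toNat "<START>" ++ tokens'
  (tokens'.foldl
    (fun (s : Int × Int × List (List String × String)) x =>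
      (s.1 + 1, s.2.1 + 1, s.2.2 ++ [(PySem.List.slice initial (some s.1) (some s.2.1), x)]))
    (0, n - 1, [])).2.2

-- ===== PORT B =====
-- literal transliteration of B's `_go`: peel one token per call, trim context by `(ctx+(x,))[1:]`
-- (the slice `[1:]` is exactly `drop 1` since the start index 1 is nonnegative)
def ngramsGo (ctx : List String) (rest : List String) (k : Nat) : List (List String × String) :=
  match rest with
  | [] => []
  | x :: rest' =>
      let newCtx := if k ≠ 0 then (ctx ++ [x]).drop 1 else ctx
      [(ctx, x)] ++ ngramsGo newCtx rest' k

-- literal transliteration of B's `ngrams`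
def ngrams_alt (n : Int) (tokens : List String) : List (List String × String) :=
  let toks := tokens ++ ["<END>"]
  let k := if n > 1 then (n - 1).toNat else 0
  ngramsGo (List.replicate k "<START>") toks k

-- ===== PRECONDITION & SPEC =====
-- For n ≤ 0 with n + len(tokens) > 0, A's negative slice end makes it return leftover slices of the
-- token list as contexts (the whole token list for n = 0), while B returns the empty context at every
-- position — the intended value, since an n-gram with n ≤ 1 has no context tokens.
def D_ngrams (n : Int) (tokens : List String) : Prop := n ≤ 0 ∧ 0 < n + (tokens.length : Int)
instance (n : Int) (tokens : List String) : Decidable (D_ngrams n tokens) := by unfold D_ngrams; infer_instance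
def Spec_ngrams (n : Int) (tokens : List String) (out : List (List String × String)) : Prop := ¬ D_ngrams n tokens → out = ngrams_alt n tokens
instance (n : Int) (tokens : List String) (out : List (List String × String)) : Decidable (Spec_ngrams n tokens out) := by unfold Spec_ngrams; infer_instance
def pvDiffWitness_ngrams : Int × List String := (0, ["a"])
def pvDiffWitnessOut_ngrams : (List (List String × String)) × (List (List String × String)) :=
  ([(["a"], "a"), ([], "<END>")], [([], "a"), ([], "<END>")])

-- ===== CLAIM (what is proved, stated in full; the proofs are below) =====
def Claim_unchanged_ngrams : Prop := ∀ (n : Int) (tokens : List String), Dom_ngrams n tokens → Spec_ngrams n tokens (ngrams n tokens)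
def Claim_changed_ngrams : Prop := Dom_ngrams (pvDiffWitness_ngrams.1) (pvDiffWitness_ngrams.2) ∧ D_ngrams (pvDiffWitness_ngrams.1) (pvDiffWitness_ngrams.2) ∧ ngrams (pvDiffWitness_ngrams.1) (pvDiffWitness_ngrams.2) = pvDiffWitnessOut_ngrams.1 ∧ ngrams_alt (pvDiffWitness_ngrams.1) (pvDiffWitness_ngrams.2) = pvDiffWitnessOut_ngrams.2 ∧ pvDiffWitnessOut_ngrams.1 ≠ pvDiffWitnessOut_ngrams.2
def Claim_exact_ngrams : Prop := ∀ (n : Int) (tokens : List String), Dom_ngrams n tokens → D_ngrams n tokens → ngrams n tokens ≠ ngrams_alt n tokens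

-- ===== LEMMAS AND PROOFS =====

-- A's loop agrees with B's recursion step by step when the window width d = (n-1).toNat is exact
theorem loopA_eq_go (initial : List String) (d : Nat) :
    ∀ (ts : List String) (f : Nat) (acc : List (List String × String)),
      initial.drop (f + d) = ts →
      (ts.foldl
        (fun (s : Int × Int × List (List String × String)) x =>
          (s.1 + 1, s.2.1 + 1, s.2.2 ++ [(PySem.List.slice initial (some s.1) (some s.2.1), x)]))
        ((f : Int), (f : Int) + (d : Int), acc)).2.2
      = acc ++ ngramsGo ((initial.drop f).take d) ts d := by
  intro ts
  induction ts with
  | nil => intro f acc _; simp [ngramsGo]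
  | cons x t ih =>
    intro f acc hts
    have hdrop1 : initial.drop (f + 1 + d) = t := by
      have h2 := congrArg (List.drop 1) hts
      simp only [List.drop_drop] at h2
      simpa [show f + 1 + d = f + d + 1 by omega] using h2
    have hctx : (if (d : Nat) ≠ 0 then (((initial.drop f).take d) ++ [x]).drop 1
          else (initial.drop f).take d) = (initial.drop (f + 1)).take d := by
      by_cases hd : d = 0
      · subst hd; simp
      · obtain ⟨e, rfl⟩ : ∃ e, d = e + 1 := ⟨d - 1, by omega⟩
        have hget : (initial.drop (f + 1))[e]? = some x := by
          rw [← List.head?_drop, List.drop_drop, show f + 1 + e = f + (e + 1) by omega, hts]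
          rfl
        have hlen : 1 ≤ ((initial.drop f).take (e + 1)).length := by
          have : f + (e + 1) < initial.length := by
            have := congrArg List.length hts
            simp only [List.length_drop, List.length_cons] at this
            omega
          simp only [List.length_take, List.length_drop]
          omega
        rw [if_pos (Nat.succ_ne_zero e), List.drop_append_of_le_length hlen]
        rw [List.drop_take, List.drop_drop]
        rw [show e + 1 - 1 = e by omega]
        rw [List.take_add_one, hget]
        rfl
    simp only [List.foldl_cons, ngramsGo]
    rw [PySem.List.slice_natCast_add]
    have e1 : ((f : Int) + 1) = (((f + 1 : Nat)) : Int) := by push_cast; ring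
    have e2 : ((f : Int) + (d : Int) + 1) = (((f + 1 : Nat)) : Int) + (d : Int) := by push_cast; ring
    rw [e1, e2, ih (f + 1) (acc ++ [((initial.drop f).take d, x)]) hdrop1, hctx]
    simp

-- every slice A takes is empty when n ≤ 0 and n + len(tokens) ≤ 0
theorem slice_empty_of (xs : List String) (a c : Int) (h0 : 0 ≤ a) (hc : (xs.length : Int) + c ≤ 0)
    (hneg : c < 0) : PySem.List.slice xs (some a) (some (a + c)) = [] := by
  apply List.eq_nil_of_length_eq_zero
  rw [PySem.List.length_slice]
  obtain ⟨p, rfl⟩ : ∃ p : Nat, a = (p : Int) := ⟨a.toNat, by omega⟩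
  rw [PySem.List.clampIdx_natCast]
  by_cases h : 0 ≤ (p : Int) + c
  · obtain ⟨q, hq⟩ : ∃ q : Nat, (p : Int) + c = (q : Int) := ⟨((p:Int)+c).toNat, by omega⟩
    rw [hq, PySem.List.clampIdx_natCast]
    omega
  · obtain ⟨k, hk, hk0⟩ : ∃ k : Nat, (p : Int) + c = -(k : Int) ∧ 0 < k :=
      ⟨(-((p:Int)+c)).toNat, by omega, by omega⟩
    rw [hk, PySem.List.clampIdx_neg_natCast _ _ hk0]
    omega

theorem loopA_empty_slices (initial : List String) (c : Int)
    (h : ∀ a : Int, 0 ≤ a → PySem.List.slice initial (some a) (some (a + c)) = []) :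
    ∀ (ts : List String) (f : Nat) (acc : List (List String × String)),
      (ts.foldl
        (fun (s : Int × Int × List (List String × String)) x =>
          (s.1 + 1, s.2.1 + 1, s.2.2 ++ [(PySem.List.slice initial (some s.1) (some s.2.1), x)]))
        ((f : Int), (f : Int) + c, acc)).2.2
      = acc ++ ts.map (fun x => ([], x)) := by
  intro ts
  induction ts with
  | nil => intro f acc; simp
  | cons x t ih =>
    intro f acc
    simp only [List.foldl_cons, List.map_cons]
    rw [h (f : Int) (by exact_mod_cast Nat.zero_le f)]
    have e1 : ((f : Int) + 1) = (((f + 1 : Nat)) : Int) := by push_cast; ring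
    have e2 : ((f : Int) + c + 1) = (((f + 1 : Nat)) : Int) + c := by push_cast; ring
    rw [e1, e2, ih (f + 1)]
    simp

-- with k = 0 the recursion keeps its context unchanged
theorem go_zero (ctx : List String) :
    ∀ (ts : List String), ngramsGo ctx ts 0 = ts.map (fun x => (ctx, x)) := by
  intro ts
  induction ts with
  | nil => simp [ngramsGo]
  | cons x t ih => simp [ngramsGo, ih]

-- the accumulator is a prefix of A's loop result (used for the tightness proof)
theorem loopA_prefix (initial : List String) :
    ∀ (ts : List String) (s : Int × Int × List (List String × String)),
      ∃ r, (ts.foldl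
        (fun (s : Int × Int × List (List String × String)) x =>
          (s.1 + 1, s.2.1 + 1, s.2.2 ++ [(PySem.List.slice initial (some s.1) (some s.2.1), x)]))
        s).2.2 = s.2.2 ++ r := by
  intro ts
  induction ts with
  | nil => intro s; exact ⟨[], by simp⟩
  | cons x t ih =>
    intro s
    obtain ⟨r, hr⟩ := ih (s.1 + 1, s.2.1 + 1, s.2.2 ++ [(PySem.List.slice initial (some s.1) (some s.2.1), x)])
    exact ⟨[(PySem.List.slice initial (some s.1) (some s.2.1), x)] ++ r, by
      simp only [List.foldl_cons]; rw [hr]; simp⟩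

-- main equivalence, split by the sign of n - 1
theorem ngrams_eq_of_one_le (n : Int) (tokens : List String) (h1 : 1 ≤ n) :
    ngrams n tokens = ngrams_alt n tokens := by
  obtain ⟨d, rfl⟩ : ∃ d : Nat, n = (d : Int) + 1 := ⟨(n - 1).toNat, by omega⟩
  simp only [ngrams, ngrams_alt]
  rw [show ((d : Int) + 1 - 1) = (d : Int) by ring]
  rw [show (if ((d : Int) + 1) > 1 then ((d : Int)).toNat else 0) = d by
    split_ifs with h <;> omega]
  simp only [Int.toNat_natCast]
  have hctx : ((List.replicate d "<START>" ++ (tokens ++ ["<END>"])).drop 0).take d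
      = List.replicate d "<START>" := by
    rw [List.drop_zero, List.take_append_of_le_length (by simp), List.take_replicate]
    simp
  have h := loopA_eq_go (List.replicate d "<START>" ++ (tokens ++ ["<END>"])) d
    (tokens ++ ["<END>"]) 0 [] (by simp)
  rw [hctx] at h
  simpa using h

theorem ngrams_eq_of_nonpos (n : Int) (tokens : List String) (h1 : n ≤ 0)
    (h2 : n + (tokens.length : Int) ≤ 0) : ngrams n tokens = ngrams_alt n tokens := by
  simp only [ngrams, ngrams_alt]
  rw [show (n - 1).toNat = 0 by omega, ite_self]
  simp only [List.replicate_zero, List.nil_append]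
  have hA := loopA_empty_slices (tokens ++ ["<END>"]) (n - 1)
    (fun a ha => slice_empty_of _ a (n - 1) ha (by simp; omega) (by omega))
    (tokens ++ ["<END>"]) 0 []
  simp only [Nat.cast_zero, zero_add] at hA
  rw [hA, go_zero]
  simp

-- ===== VERDICT (by name: the statement is the Claim_ definition above) =====
theorem ngrams_spec : Claim_unchanged_ngrams := by
  intro n tokens _ hD
  by_cases h1 : 1 ≤ n
  · exact ngrams_eq_of_one_le n tokens h1
  · have h2 : n + (tokens.length : Int) ≤ 0 := by
      unfold D_ngrams at hD
      push Not at hD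
      have := hD (by omega)
      omega
    exact ngrams_eq_of_nonpos n tokens (by omega) h2

theorem ngrams_changed : Claim_changed_ngrams := by
  unfold Claim_changed_ngrams; decide

theorem ngrams_tight : Claim_exact_ngrams := by
  intro n tokens _ hD
  obtain ⟨hn, hm⟩ := hD
  obtain ⟨y, ys, rfl⟩ : ∃ y ys, tokens = y :: ys := by
    cases tokens with
    | nil => simp at hm; omega
    | cons y ys => exact ⟨y, ys, rfl⟩
  intro heq
  have hslice : PySem.List.slice ((y :: ys) ++ ["<END>"]) (some 0) (some (n - 1)) ≠ [] := by
    intro hnil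
    have hlen := congrArg List.length hnil
    obtain ⟨k, hk, hk0⟩ : ∃ k : Nat, n - 1 = -(k : Int) ∧ 0 < k :=
      ⟨(1 - n).toNat, by omega, by omega⟩
    rw [PySem.List.slice_zero_start, hk, PySem.List.slice_to_neg_natCast _ _ hk0] at hlen
    simp only [List.length_take, List.length_cons, List.length_append,
      List.length_nil, List.length_cons] at hlen
    simp at hm
    omega
  simp only [ngrams, ngrams_alt] at heq
  rw [show (n - 1).toNat = 0 by omega, ite_self] at heq
  simp only [List.replicate_zero, List.nil_append, List.cons_append,
    List.foldl_cons, ngramsGo] at heq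
  obtain ⟨rA, hrA⟩ := loopA_prefix ((y :: ys) ++ ["<END>"]) (ys ++ ["<END>"])
    (0 + 1, n - 1 + 1, [] ++ [(PySem.List.slice ((y :: ys) ++ ["<END>"]) (some 0) (some (n - 1)), y)])
  simp only [List.cons_append, List.nil_append] at hrA
  rw [hrA] at heq
  simp only [List.cons.injEq, Prod.mk.injEq] at heq
  exact hslice heq.1.1
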